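-- pv_equiv track=rewrite | github.com/dmed256/coding-puzzles | advent_of_code/2020/19.py | word_breakdowns
-- ===== SOURCE A (Python) =====
-- def word_breakdowns(word, parts):
--     if parts == 1:
--         return [[word]]
--
--     return [
--         [word[:i]] + other
--         for i in range(1, len(word) - parts + 2)
--         for other in word_breakdowns(word[i:], parts - 1)
--     ]
-- ===== SOURCE B (Python) =====
-- def word_breakdowns(word, parts):
--     # Bottom-up DP: cur[start] = all breakdowns of word[start:] into k parts,
--     # built once per (start, k) instead of recomputed recursively.
--     n = len(word)
--     if parts > max(n, 1):
--         return []  # more parts than characters: no breakdown exists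
--     cur = [[[word[start:]]] for start in range(n + 1)]
--     for k in range(2, parts + 1):
--         cur = [[[word[start:i]] + rest
--                 for i in range(start + 1, n - k + 2)
--                 for rest in cur[i]]
--                for start in range(n + 1)]
--     return cur[0]
-- ===== Notes on version B (the rewrite author's own statement) =====
-- stated objective: alternative
-- what changed: Replaces A's top-down recursion (which re-solves the same (suffix, remaining-parts) subproblem once per caller) with a bottom-up DP table cur[start] of breakdowns of word[start:] into k parts, computed once per round, plus the standard early-out [] when parts exceeds max(len(word),1).
import Mathlib
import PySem

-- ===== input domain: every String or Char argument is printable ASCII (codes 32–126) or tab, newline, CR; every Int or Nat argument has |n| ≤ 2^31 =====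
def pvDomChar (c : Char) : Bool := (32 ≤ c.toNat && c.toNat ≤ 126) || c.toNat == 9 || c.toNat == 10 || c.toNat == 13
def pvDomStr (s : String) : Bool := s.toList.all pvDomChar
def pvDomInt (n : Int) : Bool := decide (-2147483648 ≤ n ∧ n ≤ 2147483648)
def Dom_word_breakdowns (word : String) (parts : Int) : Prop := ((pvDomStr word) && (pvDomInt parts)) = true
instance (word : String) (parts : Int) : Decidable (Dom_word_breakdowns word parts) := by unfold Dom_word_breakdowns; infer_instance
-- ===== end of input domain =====

-- B replaces A's naive recursion by a bottom-up DP table over (suffix start, parts); objective: alternative. Equivalence of return values on parts ≥ 1.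

-- ===== PORT A =====
-- A recurses on parts; Python's `if parts == 1` is written as `parts ≤ 1` ONLY to make the
-- recursion total in Lean (Python never returns for parts ≤ 0; those inputs are outside Pre_).
def word_breakdowns (word : String) (parts : Int) : List (List String) :=
  if _h : parts ≤ 1 then [[word]]
  else
    (PySem.List.pyRange 1 ((PySem.Str.len word) - parts + 2) 1).flatMap
      (fun i =>
        (word_breakdowns (PySem.Str.slice word (some i) none) (parts - 1)).map
          (fun other => PySem.Str.slice word none (some i) :: other))
termination_by parts.toNat
decreasing_by omega

-- ===== PORT B =====
-- cur[i] and cur[0] (always in range in the Python) are ported as pyGetD with default [].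
def word_breakdowns_alt (word : String) (parts : Int) : List (List String) :=
  let n : Int := PySem.Str.len word
  if max n 1 < parts then []
  else
  let init : List (List (List String)) :=
    (PySem.List.pyRange 0 (n + 1) 1).map
      (fun start => [[PySem.Str.slice word (some start) none]])
  let final : List (List (List String)) :=
    (PySem.List.pyRange 2 (parts + 1) 1).foldl
      (fun cur k =>
        (PySem.List.pyRange 0 (n + 1) 1).map
          (fun start =>
            (PySem.List.pyRange (start + 1) (n - k + 2) 1).flatMap
              (fun i =>
                (PySem.List.pyGetD cur i []).map
                  (fun rest => PySem.Str.slice word (some start) (some i) :: rest))))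
      init
  PySem.List.pyGetD final 0 []

-- ===== PRECONDITION & SPEC =====
-- Pre_ excludes parts ≤ 0, on which the Python A never returns (unbounded recursion → RecursionError).
def Pre_word_breakdowns (word : String) (parts : Int) : Prop := 1 ≤ parts
instance (word : String) (parts : Int) : Decidable (Pre_word_breakdowns word parts) := by unfold Pre_word_breakdowns; infer_instance
def pvWitness_word_breakdowns : String × Int := ("abc", 2)

def Spec_word_breakdowns (word : String) (parts : Int) (out : List (List String)) : Prop := out = word_breakdowns_alt word parts
instance (word : String) (parts : Int) (out : List (List String)) : Decidable (Spec_word_breakdowns word parts out) := by unfold Spec_word_breakdowns; infer_instance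

-- ===== CLAIM (what is proved, stated in full; the proofs are below) =====
def Claim_equal_word_breakdowns : Prop := ∀ (word : String) (parts : Int), Dom_word_breakdowns word parts → Pre_word_breakdowns word parts → Spec_word_breakdowns word parts (word_breakdowns word parts)

-- ===== LEMMAS AND PROOFS =====

-- B's loop body, initial table, and the intended meaning of the table after round k.
def wbStep (word : String) (cur : List (List (List String))) (k : Int) : List (List (List String)) :=
  (PySem.List.pyRange 0 ((PySem.Str.len word) + 1) 1).map
    (fun start =>
      (PySem.List.pyRange (start + 1) ((PySem.Str.len word) - k + 2) 1).flatMap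
        (fun i =>
          (PySem.List.pyGetD cur i []).map
            (fun rest => PySem.Str.slice word (some start) (some i) :: rest)))

def wbInit (word : String) : List (List (List String)) :=
  (PySem.List.pyRange 0 ((PySem.Str.len word) + 1) 1).map
    (fun start => [[PySem.Str.slice word (some start) none]])

def wbRow (word : String) (k : Int) : List (List (List String)) :=
  (PySem.List.pyRange 0 ((PySem.Str.len word) + 1) 1).map
    (fun start => word_breakdowns (PySem.Str.slice word (some start) none) k)

lemma alt_eq (word : String) (parts : Int) :
    word_breakdowns_alt word parts =
      if max (PySem.Str.len word) 1 < parts then []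
      else PySem.List.pyGetD ((PySem.List.pyRange 2 (parts + 1) 1).foldl (wbStep word) (wbInit word)) 0 [] := rfl

lemma A_nil (word : String) (parts : Int) (hk : 2 ≤ parts)
    (h : (word.toList.length : Int) < parts) : word_breakdowns word parts = [] := by
  rw [word_breakdowns, dif_neg (by omega : ¬ parts ≤ 1)]
  rw [PySem.Str.len_eq, PySem.List.pyRange_one_eq_nil (by omega)]
  rfl

lemma slice_from_from (word : String) (sn im : Nat) :
    PySem.Str.slice (PySem.Str.slice word (some (sn:Int)) none) (some (im:Int)) none
      = PySem.Str.slice word (some ((sn:Int) + (im:Int))) none := by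
  have h : (sn:Int) + (im:Int) = ((sn + im : Nat) : Int) := by push_cast; ring
  simp only [PySem.Str.slice, String.toList_ofList, PySem.Chars.slice_eq_listSlice, h,
             PySem.List.slice_from_natCast, List.drop_drop]

lemma slice_from_to (word : String) (sn im : Nat) :
    PySem.Str.slice (PySem.Str.slice word (some (sn:Int)) none) none (some (im:Int))
      = PySem.Str.slice word (some (sn:Int)) (some ((sn:Int) + (im:Int))) := by
  simp only [PySem.Str.slice, String.toList_ofList, PySem.Chars.slice_eq_listSlice,
             PySem.List.slice_from_natCast, PySem.List.slice_to_natCast,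
             PySem.List.slice_natCast_add]

lemma slice_zero (word : String) : PySem.Str.slice word (some (0:Int)) none = word := by
  simp only [PySem.Str.slice, PySem.Chars.slice_eq_listSlice]
  rw [show (0:Int) = ((0:Nat):Int) from rfl, PySem.List.slice_from_natCast]
  simp [String.ofList_toList]

lemma len_slice_from (word : String) (sn : Nat) (h : sn ≤ word.toList.length) :
    PySem.Str.len (PySem.Str.slice word (some (sn:Int)) none)
      = (word.toList.length : Int) - sn := by
  simp only [PySem.Str.len_eq, PySem.Str.toList_slice, PySem.Chars.slice_eq_listSlice,
             PySem.List.slice_from_natCast, List.length_drop]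
  omega

-- One unfolding of A at a suffix, re-indexed to absolute positions in `word`.
lemma A_step (word : String) (k s : Int) (hk : 2 ≤ k) (h0 : 0 ≤ s)
    (hs : s ≤ (word.toList.length : Int)) :
    word_breakdowns (PySem.Str.slice word (some s) none) k
      = (PySem.List.pyRange (s + 1) ((word.toList.length : Int) - k + 2) 1).flatMap
          (fun i =>
            (word_breakdowns (PySem.Str.slice word (some i) none) (k - 1)).map
              (fun other => PySem.Str.slice word (some s) (some i) :: other)) := by
  obtain ⟨sn, rfl⟩ : ∃ m : Nat, s = (m : Int) := ⟨s.toNat, by omega⟩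
  rw [word_breakdowns]
  rw [dif_neg (by omega : ¬ k ≤ 1)]
  rw [len_slice_from word sn (by exact_mod_cast hs)]
  rw [PySem.List.pyRange_one 1 _, PySem.List.pyRange_one ((sn:Int) + 1) _]
  rw [List.flatMap_map, List.flatMap_map]
  rw [show (((word.toList.length : Int) - sn - k + 2) - 1).toNat
        = (((word.toList.length : Int) - k + 2) - ((sn:Int) + 1)).toNat by omega]
  apply List.flatMap_congr
  intro t _ht
  rw [show (1:Int) + (t:Int) = ((1 + t : Nat) : Int) by push_cast; ring]
  rw [slice_from_from word sn (1 + t), slice_from_to word sn (1 + t)]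
  rw [show (sn:Int) + ((1 + t : Nat) : Int) = (sn:Int) + 1 + (t:Int) by push_cast; ring]

lemma wb_one (w : String) : word_breakdowns w 1 = [[w]] := by
  rw [word_breakdowns]
  simp

lemma init_row (word : String) : wbInit word = wbRow word 1 := by
  unfold wbInit wbRow
  apply List.map_congr_left
  intro start _
  rw [wb_one]

lemma step_row (word : String) (k : Int) (hk : 2 ≤ k) :
    wbStep word (wbRow word (k - 1)) k = wbRow word k := by
  unfold wbStep wbRow
  simp only [PySem.Str.len_eq]
  apply List.map_congr_left
  intro start hstart
  rw [PySem.List.mem_pyRange_one] at hstart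
  rw [A_step word k start hk hstart.1 (by omega)]
  apply List.flatMap_congr
  intro i hi
  rw [PySem.List.mem_pyRange_one] at hi
  rw [PySem.List.pyGetD_map_pyRange_of_nonneg
        (fun st => word_breakdowns (PySem.Str.slice word (some st) none) (k - 1))
        ((word.toList.length : Int) + 1) i [] (by omega) (by omega)]

lemma fold_inv (word : String) (j : Nat) :
    (PySem.List.pyRange 2 (2 + (j:Int)) 1).foldl (wbStep word) (wbInit word)
      = wbRow word (1 + (j:Int)) := by
  induction j with
  | zero =>
      rw [PySem.List.pyRange_one_eq_nil (by omega)]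
      simpa using init_row word
  | succ m ih =>
      rw [show (2:Int) + ((m + 1 : Nat) : Int) = (2 + (m:Int)) + 1 by push_cast; ring]
      rw [PySem.List.pyRange_one_succ_right (by omega), List.foldl_append]
      rw [ih]
      simp only [List.foldl_cons, List.foldl_nil]
      have h := step_row word (2 + (m:Int)) (by omega)
      rw [show (2 + (m:Int)) - 1 = 1 + (m:Int) by ring] at h
      rw [h]
      rw [show (1 : Int) + ((m + 1 : Nat) : Int) = 2 + (m:Int) by push_cast; ring]

-- ===== VERDICT (by name: the statement is the Claim_ definition above) =====
theorem word_breakdowns_spec : Claim_equal_word_breakdowns := by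
  intro word parts _hdom hpre
  unfold Spec_word_breakdowns
  have hp : 1 ≤ parts := hpre
  obtain ⟨j, rfl⟩ : ∃ j : Nat, parts = 1 + (j:Int) := ⟨(parts - 1).toNat, by omega⟩
  rw [alt_eq]
  by_cases hbig : max (PySem.Str.len word) 1 < 1 + (j:Int)
  · rw [if_pos hbig]
    rw [PySem.Str.len_eq] at hbig
    exact A_nil word _ (by omega) (by omega)
  rw [if_neg hbig]
  rw [show (1 + (j:Int)) + 1 = 2 + (j:Int) by ring]
  rw [fold_inv]
  unfold wbRow
  simp only [PySem.Str.len_eq]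
  rw [PySem.List.pyGetD_map_pyRange_of_nonneg
        (fun st => word_breakdowns (PySem.Str.slice word (some st) none) (1 + (j:Int)))
        ((word.toList.length : Int) + 1) 0 [] le_rfl (by omega)]
  rw [slice_zero]
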